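-- pv_equiv track=rewrite | github.com/newwin01/CI_Mutation_Testing | generate_report.py | summarize_mutation
-- ===== SOURCE A (Python) =====
-- def summarize_mutation(mutation_desc: str) -> str:
--     lines = mutation_desc.splitlines()
--     original_line = ""
--     mutated_line = ""
--
--     for line in lines:
--         if line.startswith('-') and not line.startswith('---'):
--             original_line = line[1:].strip()
--         elif line.startswith('+') and not line.startswith('+++'):
--             mutated_line = line[1:].strip()
--
--     if original_line and mutated_line:
--         return f"Changed `{original_line}` to `{mutated_line}`"
--     return "Mutation applied to unknown line"
-- ===== SOURCE B (Python) =====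
-- def summarize_mutation(mutation_desc: str) -> str:
--     original_line = ""
--     mutated_line = ""
--     have_orig = False
--     have_mut = False
--     for line in reversed(mutation_desc.splitlines()):
--         if not have_orig and line.startswith('-') and not line.startswith('---'):
--             original_line = line[1:].strip()
--             have_orig = True
--         elif not have_mut and line.startswith('+') and not line.startswith('+++'):
--             mutated_line = line[1:].strip()
--             have_mut = True
--         if have_orig and have_mut:
--             break
--     if original_line and mutated_line:
--         return f"Changed `{original_line}` to `{mutated_line}`"
--     return "Mutation applied to unknown line"
-- ===== Notes on version B (the rewrite author's own statement) =====
-- stated objective: alternative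
-- what changed: Scans the lines in reverse with captured-flags and an early break after both the last '-' and last '+' diff lines are found, instead of A's full forward pass that keeps overwriting both slots.
import Mathlib
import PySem

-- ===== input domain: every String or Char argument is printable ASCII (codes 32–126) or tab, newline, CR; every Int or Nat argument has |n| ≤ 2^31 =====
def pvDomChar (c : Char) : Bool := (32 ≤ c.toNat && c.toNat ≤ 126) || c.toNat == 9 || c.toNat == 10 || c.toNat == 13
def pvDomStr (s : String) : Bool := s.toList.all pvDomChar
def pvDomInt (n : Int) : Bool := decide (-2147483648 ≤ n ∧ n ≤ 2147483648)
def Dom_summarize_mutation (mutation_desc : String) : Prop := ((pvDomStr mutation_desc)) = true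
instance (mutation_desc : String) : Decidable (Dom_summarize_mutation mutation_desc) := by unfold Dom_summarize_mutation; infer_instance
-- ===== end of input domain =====

-- B scans the lines in reverse with captured-flags and breaks once both diff lines are found (alternative decomposition, same cost).


-- shared transliterations of the Python expressions both versions use verbatim
-- line.startswith('-') and not line.startswith('---')
def pvIsMinus (line : String) : Bool :=
  PySem.Str.startswith line "-" && !(PySem.Str.startswith line "---")
-- line.startswith('+') and not line.startswith('+++')
def pvIsPlus (line : String) : Bool :=
  PySem.Str.startswith line "+" && !(PySem.Str.startswith line "+++")
-- line[1:].strip()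
def pvCont (line : String) : String :=
  PySem.Str.strip (PySem.Str.slice line (some 1) none)

-- ===== PORT A =====
-- the loop body of A: fold state is (original_line, mutated_line)
def pvStepA (st : String × String) (line : String) : String × String :=
  if pvIsMinus line then (pvCont line, st.2)
  else if pvIsPlus line then (st.1, pvCont line)
  else st

def summarize_mutation (mutation_desc : String) : String :=
  let lines := PySem.Str.splitlines mutation_desc
  let st := lines.foldl pvStepA ("", "")
  if st.1 != "" && st.2 != "" then
    "Changed `" ++ st.1 ++ "` to `" ++ st.2 ++ "`"
  else "Mutation applied to unknown line"

-- ===== PORT B =====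
-- B's reverse loop: state (original_line, mutated_line, have_orig, have_mut), break when both flags set
def pvGoB : List String → String → String → Bool → Bool → String × String
  | [], o, m, _, _ => (o, m)
  | line :: rest, o, m, ho, hm =>
    let s :=
      if !ho && pvIsMinus line then (pvCont line, m, true, hm)
      else if !hm && pvIsPlus line then (o, pvCont line, ho, true)
      else (o, m, ho, hm)
    if s.2.2.1 && s.2.2.2 then (s.1, s.2.1)
    else pvGoB rest s.1 s.2.1 s.2.2.1 s.2.2.2

def summarize_mutation_alt (mutation_desc : String) : String :=
  let st := pvGoB (PySem.Str.splitlines mutation_desc).reverse "" "" false false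
  if st.1 != "" && st.2 != "" then
    "Changed `" ++ st.1 ++ "` to `" ++ st.2 ++ "`"
  else "Mutation applied to unknown line"

-- ===== PRECONDITION & SPEC =====
def Spec_summarize_mutation (mutation_desc : String) (out : String) : Prop := out = summarize_mutation_alt mutation_desc
instance (mutation_desc : String) (out : String) : Decidable (Spec_summarize_mutation mutation_desc out) := by unfold Spec_summarize_mutation; infer_instance

-- ===== CLAIM (what is proved, stated in full; the proofs are below) =====
def Claim_equal_summarize_mutation : Prop := ∀ (mutation_desc : String), Dom_summarize_mutation mutation_desc → Spec_summarize_mutation mutation_desc (summarize_mutation mutation_desc)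

-- ===== LEMMAS AND PROOFS =====

-- a line cannot start with both '-' and '+'
theorem pv_not_both (l : String) (h : pvIsMinus l = true) : pvIsPlus l = false := by
  simp [pvIsMinus, pvIsPlus] at *
  intro hp
  rcases (PySem.Chars.startswith_iff _ _).mp h.1 with ⟨t1, h1⟩
  rcases (PySem.Chars.startswith_iff _ _).mp hp with ⟨t2, h2⟩
  simp [String.toList] at h1 h2
  rw [← h2] at h1
  exact absurd (List.head_eq_of_cons_eq h1) (by decide)

theorem pv_not_both' (l : String) (h : pvIsPlus l = true) : pvIsMinus l = false := by
  by_cases hm : pvIsMinus l = true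
  · exact absurd h (by simp [pv_not_both l hm])
  · simpa using hm

-- A's fold keeps the content of the LAST minus / plus line
theorem foldA_eq (ls : List String) (o m : String) :
    ls.foldl pvStepA (o, m) =
      ((ls.reverse.find? pvIsMinus).elim o pvCont,
       (ls.reverse.find? pvIsPlus).elim m pvCont) := by
  induction ls generalizing o m with
  | nil => simp
  | cons l ls ih =>
    rw [List.foldl_cons]
    have hstep : pvStepA (o, m) l =
        ((if pvIsMinus l then pvCont l else o), (if pvIsPlus l then pvCont l else m)) := by
      by_cases h1 : pvIsMinus l = true
      · simp [pvStepA, h1, pv_not_both l h1]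
      · by_cases h2 : pvIsPlus l = true <;>
          simp_all [pvStepA]
    rw [hstep, ih]
    simp only [List.reverse_cons, List.find?_append]
    cases hfm : ls.reverse.find? pvIsMinus <;> cases hfp : ls.reverse.find? pvIsPlus <;>
      simp [List.find?] <;> split_ifs <;> simp_all

-- B's reverse scan keeps the FIRST minus / plus line it meets (if not already captured)
theorem goB_eq (ls : List String) (o m : String) (ho hm : Bool) :
    pvGoB ls o m ho hm =
      ((if ho then o else (ls.find? pvIsMinus).elim o pvCont),
       (if hm then m else (ls.find? pvIsPlus).elim m pvCont)) := by
  induction ls generalizing o m ho hm with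
  | nil => cases ho <;> cases hm <;> simp [pvGoB]
  | cons l ls ih =>
    by_cases h1 : (!ho && pvIsMinus l) = true
    · have hmi : pvIsMinus l = true := by simp_all
      have hho : ho = false := by simp_all
      have hpl : pvIsPlus l = false := pv_not_both l hmi
      cases hm with
      | true => simp [pvGoB, hho, hmi, List.find?]
      | false =>
        simp only [pvGoB, h1, if_true]
        rw [ih]
        simp [List.find?, hmi, hpl, hho]
    · by_cases h2 : (!hm && pvIsPlus l) = true
      · have hpl : pvIsPlus l = true := by simp_all
        have hhm : hm = false := by simp_all
        have hmi : pvIsMinus l = false := pv_not_both' l hpl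
        cases ho with
        | true => simp [pvGoB, hhm, hpl, List.find?, hmi]
        | false =>
          simp only [pvGoB, h1, h2, if_true]
          rw [ih]
          simp [List.find?, hpl, hmi, hhm]
      · have hstay : (if (!ho && pvIsMinus l) = true then (pvCont l, m, true, hm)
            else if (!hm && pvIsPlus l) = true then (o, pvCont l, ho, true)
            else (o, m, ho, hm)) = (o, m, ho, hm) := by simp [h1, h2]
        simp only [pvGoB, hstay]
        rcases hbreak : (ho && hm) with _ | _
        · rw [if_neg (by simp)]
          rw [ih]
          by_cases hho : ho = true
          · have hhm : hm = false := by simp_all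
            have hpl : pvIsPlus l = false := by simp_all
            simp [hho, hhm, List.find?, hpl]
          · have hho' : ho = false := by simp_all
            have hmi : pvIsMinus l = false := by simp_all
            by_cases hhm : hm = true
            · simp [hho', hhm, List.find?, hmi]
            · have hhm' : hm = false := by simp_all
              have hpl : pvIsPlus l = false := by simp_all
              simp [hho', hhm', List.find?, hmi, hpl]
        · have hho : ho = true := by simp_all
          have hhm : hm = true := by simp_all
          simp [hho, hhm]

-- ===== VERDICT (by name: the statement is the Claim_ definition above) =====
theorem summarize_mutation_spec : Claim_equal_summarize_mutation := by
  intro s _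
  show summarize_mutation s = summarize_mutation_alt s
  simp only [summarize_mutation, summarize_mutation_alt]
  rw [foldA_eq, goB_eq]
  simp
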